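-- pv_equiv track=rewrite | github.com/dynotw/ECE143-HWs | map_test.py | map_bitstring
-- ===== SOURCE A (Python) =====
-- def map_bitstring(x):
--     '''
--
--     :param x: input, list
--     :return: dict
--     '''
--
--     assert isinstance(x,list)
--     for i in x:
--         assert isinstance(i,str)
--
--     dict1=dict()
--
--     for i in x:
--         dict1[i]=[]
--     for i in x:
--         if i.count('0') > i.count('1'):
--             dict1[i].append(0)
--         else:
--             dict1[i].append(1)
--
--     return dict1
-- ===== SOURCE B (Python) =====
-- def map_bitstring(x):
--     '''
--
--     :param x: input, list
--     :return: dict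
--     '''
--
--     assert isinstance(x, list)
--     for i in x:
--         assert isinstance(i, str)
--
--     counts = {}
--     for i in x:
--         counts[i] = counts.get(i, 0) + 1
--
--     return {k: [0 if k.count('0') > k.count('1') else 1] * n
--             for k, n in counts.items()}
-- ===== Notes on version B (the rewrite author's own statement) =====
-- stated objective: alternative
-- what changed: B replaces A's two full passes over x (init every key to [], then append the majority bit per occurrence) with one counting pass building a frequency dict and a comprehension over the distinct keys emitting [maj]*count per key.
import Mathlib
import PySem

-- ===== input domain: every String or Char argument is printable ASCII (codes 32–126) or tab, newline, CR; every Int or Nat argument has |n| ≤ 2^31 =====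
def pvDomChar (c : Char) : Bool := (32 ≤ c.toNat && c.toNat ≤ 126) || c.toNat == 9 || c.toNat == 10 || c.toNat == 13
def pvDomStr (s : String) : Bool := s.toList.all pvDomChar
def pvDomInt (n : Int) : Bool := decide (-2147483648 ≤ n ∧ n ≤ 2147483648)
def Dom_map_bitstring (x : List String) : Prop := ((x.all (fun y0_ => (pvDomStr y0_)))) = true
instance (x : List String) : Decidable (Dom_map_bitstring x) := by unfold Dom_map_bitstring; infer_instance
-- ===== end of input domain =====

-- B replaces A's two full passes over x (init-to-[], then append-per-occurrence) by a counting
-- dict built in one pass and a comprehension over its distinct keys ([maj]*count per key);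
-- objective: alternative decomposition. Both programs are total on lists of strings.

-- ===== PORT A =====
def map_bitstring (x : List String) : List (String × List Int) :=
  let d1 : PySem.Dict String (List Int) :=
    x.foldl (fun d i => d.insert i ([] : List Int)) PySem.Dict.empty
  let d2 : PySem.Dict String (List Int) :=
    x.foldl (fun d i =>
      if PySem.Str.count i "0" > PySem.Str.count i "1" then
        d.modify i [] (fun l => l ++ [(0 : Int)])
      else
        d.modify i [] (fun l => l ++ [(1 : Int)])) d1
  d2.items

-- ===== PORT B =====
-- Python's `[v] * n` for an Int n is List.replicate n.toNat [v-elements]: exact, since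
-- list repetition by a non-positive int is the empty list and toNat sends those to 0.
def map_bitstring_alt (x : List String) : List (String × List Int) :=
  let counts : PySem.Dict String Int :=
    x.foldl (fun d i => d.insert i (d.getD i 0 + 1)) PySem.Dict.empty
  (counts.items.foldl (fun d (p : String × Int) =>
      d.insert p.1
        (List.replicate p.2.toNat
          (if PySem.Str.count p.1 "0" > PySem.Str.count p.1 "1" then (0 : Int) else 1)))
    PySem.Dict.empty).items

-- ===== PRECONDITION & SPEC =====
def Spec_map_bitstring (x : List String) (out : List (String × List Int)) : Prop := out = map_bitstring_alt x
instance (x : List String) (out : List (String × List Int)) : Decidable (Spec_map_bitstring x out) := by unfold Spec_map_bitstring; infer_instance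

-- ===== CLAIM (what is proved, stated in full; the proofs are below) =====
def Claim_equal_map_bitstring : Prop := ∀ (x : List String), Dom_map_bitstring x → Spec_map_bitstring x (map_bitstring x)

-- ===== LEMMAS AND PROOFS =====

-- the majority bit of a key, as both programs compute it
def majBit (s : String) : Int :=
  if PySem.Str.count s "0" > PySem.Str.count s "1" then 0 else 1

-- A's branch is one modify with majBit
lemma stepA_eq (d : PySem.Dict String (List Int)) (i : String) :
    (if PySem.Str.count i "0" > PySem.Str.count i "1" then
        d.modify i [] (fun l => l ++ [(0 : Int)])
      else
        d.modify i [] (fun l => l ++ [(1 : Int)]))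
    = d.modify i [] (fun l => l ++ [majBit i]) := by
  unfold majBit; split_ifs <;> rfl

-- B's counting step IS Counter's step
lemma stepB_eq (d : PySem.Dict String Int) (i : String) :
    d.insert i (d.getD i 0 + 1) = d.modify i 0 (· + 1) := by
  simp [PySem.Dict.modify, PySem.Dict.insert, PySem.Dict.getD]

lemma counts_eq_counter (x : List String) :
    x.foldl (fun d i => d.insert i (d.getD i 0 + 1)) PySem.Dict.empty
      = PySem.Dict.counter x := by
  rw [PySem.Dict.counter_eq_foldl]
  have h : (fun (d : PySem.Dict String Int) i => d.insert i (d.getD i 0 + 1))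
      = fun d i => d.modify i 0 (· + 1) := funext fun d => funext fun i => stepB_eq d i
  rw [h]

-- inserting a list of pairs with fresh, pairwise-distinct keys into a dict appends them
lemma items_foldl_insert_fresh (g : String × Int → List Int) :
    ∀ (ps : List (String × Int)) (d : PySem.Dict String (List Int)),
      (ps.map Prod.fst).Nodup → (∀ p ∈ ps, d.contains p.1 = false) →
      (ps.foldl (fun d p => d.insert p.1 (g p)) d).items
        = d.items ++ ps.map (fun p => (p.1, g p)) := by
  intro ps
  induction ps with
  | nil => intro d _ _; simp
  | cons p ps ih =>
    intro d hnd hfresh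
    simp only [List.foldl_cons, List.map_cons]
    rw [ih (d.insert p.1 (g p)) (by simpa using hnd.of_cons)
        (fun q hq => by
          rw [PySem.Dict.contains_insert]
          have h1 : q.1 ≠ p.1 := by
            simp only [List.map_cons, List.nodup_cons] at hnd
            exact fun h => hnd.1 (h ▸ List.mem_map_of_mem hq)
          simp [h1, hfresh q (List.mem_cons_of_mem _ hq)]),
      PySem.Dict.items_insert_of_not_contains d (g p) (hfresh p (List.mem_cons_self))]
    simp

-- keys of A's first loop = keys of Counter(x)  (both insert each i, new keys appended)
lemma keys_d1 (x : List String) :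
    ∀ (d : PySem.Dict String (List Int)) (d' : PySem.Dict String Int),
      d.keys = d'.keys →
      (x.foldl (fun d i => d.insert i ([] : List Int)) d).keys
        = (x.foldl (fun d i => d.insert i (d.getD i 0 + 1)) d').keys := by
  induction x with
  | nil => intro d d' h; simpa using h
  | cons i xs ih =>
    intro d d' h
    simp only [List.foldl_cons]
    apply ih
    by_cases hc : i ∈ d.keys
    · rw [PySem.Dict.keys_insert_of_contains _ _ (by simp [PySem.Dict.contains_eq_decide_mem_keys, hc]),
          PySem.Dict.keys_insert_of_contains _ _ (by simp [PySem.Dict.contains_eq_decide_mem_keys, h ▸ hc]), h]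
    · rw [PySem.Dict.keys_insert_of_not_contains _ _ (by simp [PySem.Dict.contains_eq_decide_mem_keys, hc]),
          PySem.Dict.keys_insert_of_not_contains _ _ (by simp [PySem.Dict.contains_eq_decide_mem_keys, h ▸ hc]), h]

-- A's second loop never changes the key list
lemma keys_d2 (x : List String) :
    ∀ (d : PySem.Dict String (List Int)), (∀ i ∈ x, i ∈ d.keys) →
      (x.foldl (fun d i => d.modify i [] (fun l => l ++ [majBit i])) d).keys = d.keys := by
  induction x with
  | nil => intro d _; rfl
  | cons i xs ih =>
    intro d hmem
    simp only [List.foldl_cons]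
    have hc : d.contains i = true := by
      simp [PySem.Dict.contains_eq_decide_mem_keys, hmem i (List.mem_cons_self)]
    have hk : (d.modify i [] (fun l => l ++ [majBit i])).keys = d.keys := by
      rw [PySem.Dict.keys_modify, PySem.Dict.keys_insert_of_contains _ _ hc]
    rw [ih _ (fun j hj => hk ▸ hmem j (List.mem_cons_of_mem _ hj)), hk]

-- A's first loop stores [] everywhere
lemma getD_d1 (x : List String) :
    ∀ (d : PySem.Dict String (List Int)) (k : String), d.getD k [] = [] →
      (x.foldl (fun d i => d.insert i ([] : List Int)) d).getD k [] = [] := by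
  induction x with
  | nil => intro d k h; simpa using h
  | cons i xs ih =>
    intro d k h
    simp only [List.foldl_cons]
    exact ih _ k (by rw [PySem.Dict.getD_insert]; split_ifs <;> simp [h])

-- A's second loop appends majBit k once per occurrence of k
lemma getD_d2 (x : List String) :
    ∀ (d : PySem.Dict String (List Int)) (k : String),
      (x.foldl (fun d i => d.modify i [] (fun l => l ++ [majBit i])) d).getD k []
        = d.getD k [] ++ List.replicate (x.count k) (majBit k) := by
  induction x with
  | nil => intro d k; simp
  | cons i xs ih =>
    intro d k
    simp only [List.foldl_cons]
    rw [ih, PySem.Dict.getD_modify]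
    by_cases hk : k = i
    · subst hk
      simp [List.count_cons_self, List.replicate_succ, List.append_assoc]
    · simp [hk, Ne.symm hk]

-- characterisation of A's result
lemma map_bitstring_eq (x : List String) :
    map_bitstring x
      = (PySem.Set.ofList x).map
          (fun k => (k, List.replicate (x.count k) (majBit k))) := by
  simp only [map_bitstring, stepA_eq]
  have hkeys1 : (x.foldl (fun d i => d.insert i ([] : List Int)) PySem.Dict.empty).keys
      = PySem.Set.ofList x := by
    rw [keys_d1 x PySem.Dict.empty PySem.Dict.empty rfl, counts_eq_counter, PySem.Dict.keys_counter]
  have hmem : ∀ i ∈ x, i ∈ (x.foldl (fun d i => d.insert i ([] : List Int)) PySem.Dict.empty).keys := by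
    intro i hi; rw [hkeys1]; exact (PySem.Set.mem_ofList _ _).mpr hi
  have hkeys2 := keys_d2 x _ hmem
  rw [PySem.Dict.items_eq_map_keys _ (by rw [hkeys2, hkeys1]; exact PySem.Set.nodup_ofList x) [],
      hkeys2, hkeys1]
  apply List.map_congr_left
  intro k _
  rw [getD_d2, getD_d1 x PySem.Dict.empty k (by simp [PySem.Dict.getD_empty])]
  simp

-- characterisation of B's result
lemma map_bitstring_alt_eq (x : List String) :
    map_bitstring_alt x
      = (PySem.Set.ofList x).map
          (fun k => (k, List.replicate (x.count k) (majBit k))) := by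
  simp only [map_bitstring_alt]
  rw [counts_eq_counter, PySem.Dict.items_counter]
  rw [items_foldl_insert_fresh _ _ PySem.Dict.empty
        (by simp [Function.comp_def, PySem.Set.nodup_ofList x])
        (fun p _ => by simp [PySem.Dict.contains_empty])]
  rw [show (PySem.Dict.empty : PySem.Dict String (List Int)).items = [] from rfl]
  simp [majBit, Function.comp_def]

-- ===== VERDICT (by name: the statement is the Claim_ definition above) =====
theorem map_bitstring_spec : Claim_equal_map_bitstring := by
  intro x _
  unfold Spec_map_bitstring
  rw [map_bitstring_eq, map_bitstring_alt_eq]
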